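-- pv_equiv track=rewrite | github.com/LetsTalktotheMoon/workpipe | runtime/resume_atomizer/consolidate_atoms.py | infer_best_for
-- ===== SOURCE A (Python) =====
-- def infer_best_for(text: str, angle_tags: list[str]) -> list[str]:
--     """推断 variant 最适合的方向"""
--     if angle_tags:
--         return angle_tags[:3]
--     # 基于文本内容推断
--     text_lower = text.lower()
--     directions = []
--     if any(w in text_lower for w in ['llm', 'ai', 'model', 'neural', 'rag', 'agent']):
--         directions.append('ai')
--     if any(w in text_lower for w in ['kubernetes', 'docker', 'terraform', 'ci/cd', 'deploy']):
--         directions.append('devops')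
--     if any(w in text_lower for w in ['api', 'grpc', 'microservice', 'backend', 'service']):
--         directions.append('backend')
--     if any(w in text_lower for w in ['security', 'compliance', 'audit', 'threat']):
--         directions.append('security')
--     if any(w in text_lower for w in ['data', 'spark', 'pipeline', 'etl', 'hive', 'sql']):
--         directions.append('data')
--     if any(w in text_lower for w in ['react', 'frontend', 'ui', 'portal', 'dashboard']):
--         directions.append('frontend')
--     if any(w in text_lower for w in ['mobile', 'android', 'ios']):
--         directions.append('mobile')
--     if any(w in text_lower for w in ['test', 'qa', 'selenium', 'coverage']):
--         directions.append('qa')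
--     return directions[:3] if directions else ['backend']
-- ===== SOURCE B (Python) =====
-- # B: naive multi-pattern scan of the text — one pass over text positions matching all
-- # keywords at each position into a hit-set, then one ordered pass over the tag order.
--
-- ORDER = ['ai', 'devops', 'backend', 'security', 'data', 'frontend', 'mobile', 'qa']
--
-- KEYTAG = [
--     ('llm', 'ai'), ('ai', 'ai'), ('model', 'ai'), ('neural', 'ai'), ('rag', 'ai'), ('agent', 'ai'),
--     ('kubernetes', 'devops'), ('docker', 'devops'), ('terraform', 'devops'), ('ci/cd', 'devops'), ('deploy', 'devops'),
--     ('api', 'backend'), ('grpc', 'backend'), ('microservice', 'backend'), ('backend', 'backend'), ('service', 'backend'),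
--     ('security', 'security'), ('compliance', 'security'), ('audit', 'security'), ('threat', 'security'),
--     ('data', 'data'), ('spark', 'data'), ('pipeline', 'data'), ('etl', 'data'), ('hive', 'data'), ('sql', 'data'),
--     ('react', 'frontend'), ('frontend', 'frontend'), ('ui', 'frontend'), ('portal', 'frontend'), ('dashboard', 'frontend'),
--     ('mobile', 'mobile'), ('android', 'mobile'), ('ios', 'mobile'),
--     ('test', 'qa'), ('qa', 'qa'), ('selenium', 'qa'), ('coverage', 'qa'),
-- ]
--
--
-- def infer_best_for(text: str, angle_tags: list[str]) -> list[str]: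
--     if angle_tags:
--         return angle_tags[:3]
--     text_lower = text.lower()
--     hit = set()
--     for i in range(len(text_lower)):
--         for kw, tag in KEYTAG:
--             if tag not in hit and text_lower.startswith(kw, i):
--                 hit.add(tag)
--     directions = [tag for tag in ORDER if tag in hit]
--     return directions[:3] if directions else ['backend']
-- ===== Notes on version B (the rewrite author's own statement) =====
-- stated objective: alternative
-- what changed: Instead of eight keyword-driven 'w in text' substring tests, B runs one position-driven scan of the text matching all 38 keywords at every index into a hit set (a naive multi-pattern matcher), then emits tags by one ordered pass over the tag order; same truncation/default epilogue.
import Mathlib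
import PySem

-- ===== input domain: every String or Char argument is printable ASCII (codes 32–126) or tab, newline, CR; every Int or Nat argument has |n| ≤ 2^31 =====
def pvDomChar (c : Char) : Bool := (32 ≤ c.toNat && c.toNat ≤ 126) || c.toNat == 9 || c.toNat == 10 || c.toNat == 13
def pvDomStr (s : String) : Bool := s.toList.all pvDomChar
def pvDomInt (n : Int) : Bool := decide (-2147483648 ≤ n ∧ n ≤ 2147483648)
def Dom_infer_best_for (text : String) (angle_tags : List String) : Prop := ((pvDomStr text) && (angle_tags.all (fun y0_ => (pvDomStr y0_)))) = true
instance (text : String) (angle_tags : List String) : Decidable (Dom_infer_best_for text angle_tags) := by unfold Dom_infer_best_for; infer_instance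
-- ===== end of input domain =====

-- B replaces A's eight per-category substring tests by one position-driven scan of the
-- text matching all keywords at each index into a hit set, then an ordered pass over
-- the tag order (an alternative algorithm of the same cost).

-- ===== PORT A =====
def infer_best_for (text : String) (angle_tags : List String) : List String :=
  if angle_tags ≠ [] then PySem.List.slice angle_tags none (some 3)
  else
    let text_lower := PySem.Str.lower text
    let directions : List String := []
    let directions := if (["llm", "ai", "model", "neural", "rag", "agent"].any
        (fun w => PySem.Str.isIn w text_lower)) then directions ++ ["ai"] else directions
    let directions := if (["kubernetes", "docker", "terraform", "ci/cd", "deploy"].any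
        (fun w => PySem.Str.isIn w text_lower)) then directions ++ ["devops"] else directions
    let directions := if (["api", "grpc", "microservice", "backend", "service"].any
        (fun w => PySem.Str.isIn w text_lower)) then directions ++ ["backend"] else directions
    let directions := if (["security", "compliance", "audit", "threat"].any
        (fun w => PySem.Str.isIn w text_lower)) then directions ++ ["security"] else directions
    let directions := if (["data", "spark", "pipeline", "etl", "hive", "sql"].any
        (fun w => PySem.Str.isIn w text_lower)) then directions ++ ["data"] else directions
    let directions := if (["react", "frontend", "ui", "portal", "dashboard"].any
        (fun w => PySem.Str.isIn w text_lower)) then directions ++ ["frontend"] else directions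
    let directions := if (["mobile", "android", "ios"].any
        (fun w => PySem.Str.isIn w text_lower)) then directions ++ ["mobile"] else directions
    let directions := if (["test", "qa", "selenium", "coverage"].any
        (fun w => PySem.Str.isIn w text_lower)) then directions ++ ["qa"] else directions
    if directions ≠ [] then PySem.List.slice directions none (some 3) else ["backend"]

-- ===== PORT B =====
def pvOrder : List String :=
  ["ai", "devops", "backend", "security", "data", "frontend", "mobile", "qa"]

def pvKeyTags : List (String × String) :=
  [("llm", "ai"), ("ai", "ai"), ("model", "ai"), ("neural", "ai"), ("rag", "ai"), ("agent", "ai"),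
   ("kubernetes", "devops"), ("docker", "devops"), ("terraform", "devops"), ("ci/cd", "devops"), ("deploy", "devops"),
   ("api", "backend"), ("grpc", "backend"), ("microservice", "backend"), ("backend", "backend"), ("service", "backend"),
   ("security", "security"), ("compliance", "security"), ("audit", "security"), ("threat", "security"),
   ("data", "data"), ("spark", "data"), ("pipeline", "data"), ("etl", "data"), ("hive", "data"), ("sql", "data"),
   ("react", "frontend"), ("frontend", "frontend"), ("ui", "frontend"), ("portal", "frontend"), ("dashboard", "frontend"),
   ("mobile", "mobile"), ("android", "mobile"), ("ios", "mobile"),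
   ("test", "qa"), ("qa", "qa"), ("selenium", "qa"), ("coverage", "qa")]

-- the inner 'for kw, tag in KEYTAG' loop at one text position i;
-- 'text_lower.startswith(kw, i)' is exact as Chars.startswith on drop i since 0 ≤ i < len
def pvStep (tl : List Char) (hit : PySem.Set String) (i : Nat) : PySem.Set String :=
  pvKeyTags.foldl (fun hit kt =>
    if (!(PySem.Set.contains hit kt.2)) && PySem.Chars.startswith (tl.drop i) kt.1.toList
    then PySem.Set.add hit kt.2 else hit) hit

def infer_best_for_alt (text : String) (angle_tags : List String) : List String :=
  if angle_tags ≠ [] then PySem.List.slice angle_tags none (some 3)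
  else
    let tl := (PySem.Str.lower text).toList
    let hit := (List.range tl.length).foldl (pvStep tl) PySem.Set.empty
    let directions := pvOrder.filter (fun tag => PySem.Set.contains hit tag)
    if directions ≠ [] then directions.take 3 else ["backend"]

-- ===== PRECONDITION & SPEC =====
def Spec_infer_best_for (text : String) (angle_tags : List String) (out : List String) : Prop := out = infer_best_for_alt text angle_tags
instance (text : String) (angle_tags : List String) (out : List String) : Decidable (Spec_infer_best_for text angle_tags out) := by unfold Spec_infer_best_for; infer_instance

-- ===== CLAIM =====
def Claim_equal_infer_best_for : Prop := ∀ (text : String) (angle_tags : List String), Dom_infer_best_for text angle_tags → Spec_infer_best_for text angle_tags (infer_best_for text angle_tags)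

-- ===== LEMMAS AND PROOFS =====

-- membership after the inner keyword loop: old members plus tags matching at position i
theorem pvMem_step (tl : List Char) (i : Nat) (l : List (String × String))
    (hit : PySem.Set String) (tag : String) :
    tag ∈ l.foldl (fun hit kt =>
        if (!(PySem.Set.contains hit kt.2)) && PySem.Chars.startswith (tl.drop i) kt.1.toList
        then PySem.Set.add hit kt.2 else hit) hit
      ↔ tag ∈ hit ∨ ∃ kt ∈ l, kt.2 = tag ∧ PySem.Chars.startswith (tl.drop i) kt.1.toList = true := by
  induction l generalizing hit with
  | nil => simp
  | cons kt rest ih =>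
    rw [List.foldl_cons, ih]
    have hone : tag ∈ (if (!(PySem.Set.contains hit kt.2)) && PySem.Chars.startswith (tl.drop i) kt.1.toList
        then PySem.Set.add hit kt.2 else hit)
        ↔ tag ∈ hit ∨ (kt.2 = tag ∧ PySem.Chars.startswith (tl.drop i) kt.1.toList = true) := by
      split_ifs with h
      · simp only [Bool.and_eq_true, Bool.not_eq_true'] at h
        rw [PySem.Set.mem_add]
        constructor
        · rintro (hm | hm)
          · exact Or.inl hm
          · exact Or.inr ⟨hm.symm, h.2⟩
        · rintro (hm | ⟨h1, _⟩)
          · exact Or.inl hm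
          · exact Or.inr h1.symm
      · constructor
        · exact Or.inl
        · rintro (hm | ⟨h1, h2⟩)
          · exact hm
          · cases hcb : PySem.Set.contains hit kt.2 with
            | true => exact h1 ▸ (PySem.Set.contains_iff hit kt.2).mp hcb
            | false =>
              exact absurd (by
  simp only [Bool.and_eq_true, Bool.not_eq_true']
  exact ⟨hcb, h2⟩) h
    rw [hone]
    simp only [List.mem_cons]
    constructor
    · rintro ((hm | hm) | ⟨kt', hkt', hrest⟩)
      · exact Or.inl hm
      · exact Or.inr ⟨kt, Or.inl rfl, hm⟩
      · exact Or.inr ⟨kt', Or.inr hkt', hrest⟩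
    · rintro (hm | ⟨kt', (rfl | hkt'), hrest⟩)
      · exact Or.inl (Or.inl hm)
      · exact Or.inl (Or.inr hrest)
      · exact Or.inr ⟨kt', hkt', hrest⟩

-- membership after the outer position loop
theorem pvMem_scan (tl : List Char) (n : Nat) (s : PySem.Set String) (tag : String) :
    tag ∈ (List.range n).foldl (pvStep tl) s
      ↔ tag ∈ s ∨ ∃ i < n, ∃ kt ∈ pvKeyTags, kt.2 = tag ∧
          PySem.Chars.startswith (tl.drop i) kt.1.toList = true := by
  induction n generalizing s with
  | zero => simp
  | succ n ih =>
    rw [List.range_succ, List.foldl_append, List.foldl_cons, List.foldl_nil]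
    rw [show pvStep tl ((List.range n).foldl (pvStep tl) s) n
        = (pvKeyTags.foldl (fun hit kt =>
            if (!(PySem.Set.contains hit kt.2)) && PySem.Chars.startswith (tl.drop n) kt.1.toList
            then PySem.Set.add hit kt.2 else hit) ((List.range n).foldl (pvStep tl) s)) from rfl,
      pvMem_step, ih]
    constructor
    · rintro ((hs | ⟨i, hin, hw⟩) | hw)
      · exact Or.inl hs
      · exact Or.inr ⟨i, by omega, hw⟩
      · exact Or.inr ⟨n, by omega, hw⟩
    · rintro (hs | ⟨i, hin, hw⟩)
      · exact Or.inl (Or.inl hs)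
      · by_cases hi : i < n
        · exact Or.inl (Or.inr ⟨i, hi, hw⟩)
        · have : i = n := by omega
          subst this
          exact Or.inr hw

-- a nonempty pattern occurs at some position < length iff it is a substring
theorem pvPos_iff_isIn (tl kw : List Char) (h : kw ≠ []) :
    (∃ i < tl.length, PySem.Chars.startswith (tl.drop i) kw = true)
      ↔ PySem.Chars.isIn kw tl = true := by
  rw [← PySem.Chars.exists_prefix_drop_iff_isIn]
  constructor
  · rintro ⟨i, _, hi⟩
    exact ⟨i, (PySem.Chars.startswith_iff _ _).mp hi⟩
  · rintro ⟨j, hj⟩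
    by_cases hlt : j < tl.length
    · exact ⟨j, hlt, (PySem.Chars.startswith_iff _ _).mpr hj⟩
    · exfalso
      have hd : tl.drop j = [] := List.drop_eq_nil_of_le (by omega)
      rw [hd] at hj
      exact h (List.prefix_nil.mp hj)

-- the scanned hit set holds exactly the tags with a matching keyword
theorem pvContains_scan (tl : List Char) (tag : String) :
    PySem.Set.contains ((List.range tl.length).foldl (pvStep tl) PySem.Set.empty) tag = true
      ↔ ∃ kt ∈ pvKeyTags, kt.2 = tag ∧ PySem.Chars.isIn kt.1.toList tl = true := by
  rw [PySem.Set.contains_iff, pvMem_scan]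
  have hne : ∀ kt ∈ pvKeyTags, kt.1.toList ≠ [] := by decide
  constructor
  · rintro (hs | ⟨i, hi, kt, hkt, htag, hw⟩)
    · exact absurd hs (by simp [PySem.Set.empty])
    · exact ⟨kt, hkt, htag, (pvPos_iff_isIn tl _ (hne kt hkt)).mp ⟨i, hi, hw⟩⟩
  · rintro ⟨kt, hkt, htag, hin⟩
    obtain ⟨i, hi, hw⟩ := (pvPos_iff_isIn tl _ (hne kt hkt)).mpr hin
    exact Or.inr ⟨i, hi, kt, hkt, htag, hw⟩

-- per-tag agreement of B's hit-set test with A's keyword-list test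
theorem pvTag_ai (tls : String) :
    PySem.Set.contains ((List.range tls.toList.length).foldl (pvStep tls.toList) PySem.Set.empty) "ai"
      = (["llm", "ai", "model", "neural", "rag", "agent"].any (fun w => PySem.Str.isIn w tls)) := by
  rw [Bool.eq_iff_iff, pvContains_scan]
  simp [pvKeyTags, PySem.Str.isIn_eq]

theorem pvTag_devops (tls : String) :
    PySem.Set.contains ((List.range tls.toList.length).foldl (pvStep tls.toList) PySem.Set.empty) "devops"
      = (["kubernetes", "docker", "terraform", "ci/cd", "deploy"].any (fun w => PySem.Str.isIn w tls)) := by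
  rw [Bool.eq_iff_iff, pvContains_scan]
  simp [pvKeyTags, PySem.Str.isIn_eq]

theorem pvTag_backend (tls : String) :
    PySem.Set.contains ((List.range tls.toList.length).foldl (pvStep tls.toList) PySem.Set.empty) "backend"
      = (["api", "grpc", "microservice", "backend", "service"].any (fun w => PySem.Str.isIn w tls)) := by
  rw [Bool.eq_iff_iff, pvContains_scan]
  simp [pvKeyTags, PySem.Str.isIn_eq]

theorem pvTag_security (tls : String) :
    PySem.Set.contains ((List.range tls.toList.length).foldl (pvStep tls.toList) PySem.Set.empty) "security"
      = (["security", "compliance", "audit", "threat"].any (fun w => PySem.Str.isIn w tls)) := by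
  rw [Bool.eq_iff_iff, pvContains_scan]
  simp [pvKeyTags, PySem.Str.isIn_eq]

theorem pvTag_data (tls : String) :
    PySem.Set.contains ((List.range tls.toList.length).foldl (pvStep tls.toList) PySem.Set.empty) "data"
      = (["data", "spark", "pipeline", "etl", "hive", "sql"].any (fun w => PySem.Str.isIn w tls)) := by
  rw [Bool.eq_iff_iff, pvContains_scan]
  simp [pvKeyTags, PySem.Str.isIn_eq]

theorem pvTag_frontend (tls : String) :
    PySem.Set.contains ((List.range tls.toList.length).foldl (pvStep tls.toList) PySem.Set.empty) "frontend"
      = (["react", "frontend", "ui", "portal", "dashboard"].any (fun w => PySem.Str.isIn w tls)) := by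
  rw [Bool.eq_iff_iff, pvContains_scan]
  simp [pvKeyTags, PySem.Str.isIn_eq]

theorem pvTag_mobile (tls : String) :
    PySem.Set.contains ((List.range tls.toList.length).foldl (pvStep tls.toList) PySem.Set.empty) "mobile"
      = (["mobile", "android", "ios"].any (fun w => PySem.Str.isIn w tls)) := by
  rw [Bool.eq_iff_iff, pvContains_scan]
  simp [pvKeyTags, PySem.Str.isIn_eq]

theorem pvTag_qa (tls : String) :
    PySem.Set.contains ((List.range tls.toList.length).foldl (pvStep tls.toList) PySem.Set.empty) "qa"
      = (["test", "qa", "selenium", "coverage"].any (fun w => PySem.Str.isIn w tls)) := by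
  rw [Bool.eq_iff_iff, pvContains_scan]
  simp [pvKeyTags, PySem.Str.isIn_eq]

-- append-block view of one conditional append
theorem pvIfAppend {c : Prop} [Decidable c] (d : List String) (t : String) :
    (if c then d ++ [t] else d) = d ++ (if c then [t] else []) := by
  split_ifs <;> simp

-- one filter step as an append block
theorem pvFilterStep (p : String → Bool) (t : String) (rest : List String) :
    (t :: rest).filter p = (if p t then [t] else []) ++ rest.filter p := by
  by_cases h : p t = true <;> simp [h]

-- ===== VERDICT =====
theorem infer_best_for_spec : Claim_equal_infer_best_for := by
  intro text angle_tags _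
  unfold Spec_infer_best_for infer_best_for infer_best_for_alt
  cases angle_tags with
  | cons h t => rfl
  | nil =>
    simp only [ne_eq, not_true_eq_false, if_false]
    rw [show (3 : Int) = ((3 : Nat) : Int) from rfl, PySem.List.slice_to_natCast]
    generalize PySem.Str.lower text = tls
    simp only [pvOrder, pvFilterStep, List.filter_nil]
    rw [pvTag_ai, pvTag_devops, pvTag_backend, pvTag_security, pvTag_data,
      pvTag_frontend, pvTag_mobile, pvTag_qa]
    rw [pvIfAppend, pvIfAppend, pvIfAppend, pvIfAppend, pvIfAppend, pvIfAppend, pvIfAppend, pvIfAppend]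
    simp only [List.nil_append, List.append_nil, List.append_assoc]
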